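-- pv_equiv track=rewrite | github.com/ahmdeltoky03/Leetcode_Solutions | 2037-Minimum-Number-of-Moves-to-Seat-Everyone.py | minMovesToSeat
-- ===== SOURCE A (Python) =====
-- def minMovesToSeat(seats, students):
--     """
--     :type seats: List[int]
--     :type students: List[int]
--     :rtype: int
--     """
--     seats.sort()
--     students.sort()
--     res = 0
--     for i in range(len(students)):
--         res += abs(seats[i]-students[i])
--     return res
--     """
--     1 3 5
--     2 4 7
--     1+1+2
--     -----
--     2 2 6 6
--     1 2 3 6
--     1+0+3+0
--     """
-- ===== SOURCE B (Python) =====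
-- def minMovesToSeat(seats, students):
--     # Selection pairing: repeatedly extract the minimum of each list and pay
--     # the gap, instead of sorting both and index-summing. Return value only:
--     # does not sort the arguments in place as A does.
--     ss = list(seats)
--     ts = list(students)
--     res = 0
--     for _ in range(len(students)):
--         a = min(ss)
--         b = min(ts)
--         ss.remove(a)
--         ts.remove(b)
--         res += abs(a - b)
--     return res
-- ===== Notes on version B (the rewrite author's own statement) =====
-- stated objective: alternative
-- what changed: B replaces sort-both-then-index-sum with selection pairing: it repeatedly extracts the minimum of each (copied) list and sums the gaps, never sorting; A also sorts its arguments in place while B leaves them untouched (return value is what is proved equal).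
import Mathlib
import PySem

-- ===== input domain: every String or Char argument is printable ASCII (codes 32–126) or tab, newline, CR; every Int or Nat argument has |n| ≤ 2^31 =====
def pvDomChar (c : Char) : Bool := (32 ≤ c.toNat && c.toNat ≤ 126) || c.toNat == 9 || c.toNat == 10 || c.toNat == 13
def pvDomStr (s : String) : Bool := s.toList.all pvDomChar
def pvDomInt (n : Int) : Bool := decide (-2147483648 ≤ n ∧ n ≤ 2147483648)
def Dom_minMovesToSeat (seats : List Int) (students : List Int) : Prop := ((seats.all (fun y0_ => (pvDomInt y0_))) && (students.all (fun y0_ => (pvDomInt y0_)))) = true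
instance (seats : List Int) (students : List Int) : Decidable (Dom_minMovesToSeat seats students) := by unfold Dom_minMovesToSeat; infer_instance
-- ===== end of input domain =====

-- B pairs the lists by repeated minimum extraction instead of sorting both and index-summing
-- (alternative decomposition, not faster); A sorts its arguments in place, B does not —
-- the equivalence proved here is about the RETURN value only.

-- ===== PORT A =====
-- seats.sort(); students.sort(); res = 0; for i in range(len(students)): res += abs(seats[i]-students[i])
-- (seats[i] is in range under Pre_; pyGetD's default is never used there)
def minMovesToSeat (seats : List Int) (students : List Int) : Int :=
  let ss := PySem.List.sorted seats (fun x => x) false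
  let ts := PySem.List.sorted students (fun x => x) false
  (PySem.List.pyRange 0 (ts.length : Int) 1).foldl
    (fun res i => res + |PySem.List.pyGetD ss i 0 - PySem.List.pyGetD ts i 0|) 0

-- ===== PORT B =====
-- for _ in range(len(students)): a = min(ss); b = min(ts); ss.remove(a); ts.remove(b); res += abs(a-b)
-- (min of an empty list raises in Python: the `| _, _ =>` arm is unreachable under Pre_)
def altLoop : Nat → List Int → List Int → Int → Int
  | 0, _, _, res => res
  | n + 1, ss, ts, res =>
    match PySem.List.min? ss (fun x => x), PySem.List.min? ts (fun x => x) with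
    | some a, some b =>
        altLoop n ((PySem.List.remove? ss a).getD ss) ((PySem.List.remove? ts b).getD ts)
          (res + |a - b|)
    | _, _ => res

def minMovesToSeat_alt (seats : List Int) (students : List Int) : Int :=
  altLoop students.length seats students 0

-- ===== PRECONDITION & SPEC =====
-- A raises IndexError (and B's min(ss) raises ValueError) when there are more students than
-- seats; both programs return normally exactly when len(students) <= len(seats).
def Pre_minMovesToSeat (seats : List Int) (students : List Int) : Prop :=
  students.length ≤ seats.length
instance (seats : List Int) (students : List Int) : Decidable (Pre_minMovesToSeat seats students) := by unfold Pre_minMovesToSeat; infer_instance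

def pvWitness_minMovesToSeat : List Int × List Int := ([2, 2, 6, 6], [1, 2, 3, 6])

def Spec_minMovesToSeat (seats : List Int) (students : List Int) (out : Int) : Prop := out = minMovesToSeat_alt seats students
instance (seats : List Int) (students : List Int) (out : Int) : Decidable (Spec_minMovesToSeat seats students out) := by unfold Spec_minMovesToSeat; infer_instance

-- ===== CLAIM (what is proved, stated in full; the proofs are below) =====
def Claim_equal_minMovesToSeat : Prop := ∀ (seats : List Int) (students : List Int), Dom_minMovesToSeat seats students → Pre_minMovesToSeat seats students → Spec_minMovesToSeat seats students (minMovesToSeat seats students)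

-- ===== LEMMAS AND PROOFS =====

-- Common reference form: pair off the two lists head-to-head, stopping at the shorter one.
def pairSum : List Int → List Int → Int
  | a :: as, b :: bs => |a - b| + pairSum as bs
  | _, _ => 0

-- A's indexed fold over two (sorted) lists is pairSum, when ts is no longer than ss.
lemma foldA (ss ts : List Int) (h : ts.length ≤ ss.length) :
    (PySem.List.pyRange 0 (ts.length : Int) 1).foldl
      (fun res i => res + |PySem.List.pyGetD ss i 0 - PySem.List.pyGetD ts i 0|) 0
    = pairSum ss ts := by
  rw [PySem.List.foldl_add]
  induction ts generalizing ss with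
  | nil => simp [pairSum, PySem.List.pyRange]
  | cons b bs ih =>
    cases ss with
    | nil => simp at h
    | cons a as =>
      have hlen : ((b :: bs).length : Int) = 0 + 1 + (bs.length : Int) := by
        simp; omega
      rw [hlen, PySem.List.pyRange_one_append 0 (0 + 1) (0 + 1 + (bs.length : Int))
            (by omega) (by omega)]
      have h1 : PySem.List.pyRange 0 (0 + 1) 1 = [0] := PySem.List.pyRange_one_singleton 0
      have h2 : PySem.List.pyRange (0 + 1) (0 + 1 + (bs.length : Int)) 1
          = (PySem.List.pyRange 0 (bs.length : Int) 1).map (· + 1) := by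
        rw [PySem.List.pyRange_one 0 (bs.length : Int),
            PySem.List.pyRange_one (0 + 1) (0 + 1 + (bs.length : Int))]
        simp [List.map_map, Function.comp_def]
        intro k _
        omega
      rw [h1, h2]
      simp only [List.map_append, List.map_map, List.map_cons, List.map_nil, List.sum_append,
        Function.comp_def]
      have h' : bs.length ≤ as.length := by simpa using h
      have hsh : ∀ i : Int,
          |PySem.List.pyGetD (a :: as) (i + 1) 0 - PySem.List.pyGetD (b :: bs) (i + 1) 0|
            = |PySem.List.pyGetD as i 0 - PySem.List.pyGetD bs i 0| ∨ ¬ (0 ≤ i ∧ i < (bs.length : Int)) := by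
        intro i
        by_cases hi : 0 ≤ i ∧ i < (bs.length : Int)
        · left
          rw [PySem.List.pyGetD_eq_getElem (a :: as) (i := i + 1) 0 (by omega) (by omega),
              PySem.List.pyGetD_eq_getElem (b :: bs) (i := i + 1) 0 (by omega) (by omega),
              PySem.List.pyGetD_eq_getElem as (i := i) 0 (by omega) (by omega),
              PySem.List.pyGetD_eq_getElem bs (i := i) 0 hi.1 hi.2]
          have : (i + 1).toNat = i.toNat + 1 := by omega
          simp [this]
        · right; exact hi
      have hmap : (PySem.List.pyRange 0 (bs.length : Int) 1).map
            (fun i => |PySem.List.pyGetD (a :: as) (i + 1) 0 - PySem.List.pyGetD (b :: bs) (i + 1) 0|)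
          = (PySem.List.pyRange 0 (bs.length : Int) 1).map
            (fun i => |PySem.List.pyGetD as i 0 - PySem.List.pyGetD bs i 0|) := by
        apply List.map_congr_left
        intro i hi
        rcases hsh i with h' | h'
        · exact h'
        · exact absurd ((PySem.List.mem_pyRange_one).1 hi) h'
      rw [hmap]
      have := ih as (by simpa using Nat.le_of_succ_le_succ (by simpa using h))
      simp only [PySem.List.pyGetD_zero_cons, pairSum, List.sum_cons, List.sum_nil]
      omega

-- The first minimum sits at the head of the sorted list; erasing it sorts to the tail.
lemma sorted_min_cons (xs : List Int) (m : Int)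
    (hm : PySem.List.min? xs (fun x => x) = some m) :
    PySem.List.sorted xs (fun x => x) false
      = m :: PySem.List.sorted (xs.erase m) (fun x => x) false := by
  have hmem : m ∈ xs := PySem.List.min?_mem hm
  have hmin : ∀ y ∈ xs, m ≤ y := by
    intro y hy; exact PySem.List.min?_isMin hm y hy
  apply PySem.List.sorted_id_eq_of_perm_of_pairwise
  · exact ((PySem.List.sorted_perm (xs.erase m) (fun x => x) false).cons m).trans
      (List.perm_cons_erase hmem).symm
  · refine List.pairwise_cons.2 ⟨?_, ?_⟩
    · intro y hy
      exact hmin y (List.mem_of_mem_erase ((PySem.List.mem_sorted _ _ _ _).1 hy))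
    · exact PySem.List.sorted_pairwise (xs.erase m) (fun x => x)

-- B's selection loop computes pairSum of the two sorted lists.
lemma altLoop_eq (n : Nat) : ∀ (ss ts : List Int) (acc : Int), ts.length = n →
    n ≤ ss.length →
    altLoop n ss ts acc
      = acc + pairSum (PySem.List.sorted ss (fun x => x) false)
                      (PySem.List.sorted ts (fun x => x) false) := by
  induction n with
  | zero =>
    intro ss ts acc hts _
    have : ts = [] := List.eq_nil_of_length_eq_zero hts
    subst this
    simp [altLoop, PySem.List.sorted]
    cases PySem.List.sorted ss (fun x => x) false <;> simp [pairSum]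
  | succ n ih =>
    intro ss ts acc hts hss
    have hssne : ss ≠ [] := by intro h; subst h; simp at hss
    have htsne : ts ≠ [] := by intro h; subst h; simp at hts
    obtain ⟨a, ha⟩ : ∃ a, PySem.List.min? ss (fun x : Int => x) = some a := by
      cases hmm : PySem.List.min? ss (fun x : Int => x) with
      | none => exact absurd ((PySem.List.min?_eq_none_iff _ _).1 hmm) hssne
      | some a => exact ⟨a, rfl⟩
    obtain ⟨b, hb⟩ : ∃ b, PySem.List.min? ts (fun x : Int => x) = some b := by
      cases hmm : PySem.List.min? ts (fun x : Int => x) with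
      | none => exact absurd ((PySem.List.min?_eq_none_iff _ _).1 hmm) htsne
      | some b => exact ⟨b, rfl⟩
    have hamem : a ∈ ss := PySem.List.min?_mem ha
    have hbmem : b ∈ ts := PySem.List.min?_mem hb
    have hra : (PySem.List.remove? ss a).getD ss = ss.erase a := by
      rw [PySem.List.remove?_eq_some_erase ss a hamem]; rfl
    have hrb : (PySem.List.remove? ts b).getD ts = ts.erase b := by
      rw [PySem.List.remove?_eq_some_erase ts b hbmem]; rfl
    have hlen_a : (ss.erase a).length = ss.length - 1 := List.length_erase_of_mem hamem
    have hlen_b : (ts.erase b).length = ts.length - 1 := List.length_erase_of_mem hbmem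
    have step := ih (ss.erase a) (ts.erase b) (acc + |a - b|)
      (by omega) (by omega)
    simp only [altLoop, ha, hb, hra, hrb, step]
    rw [sorted_min_cons ss a ha, sorted_min_cons ts b hb]
    simp only [pairSum]
    ring

-- ===== VERDICT (by name: the statement is the Claim_ definition above) =====
theorem minMovesToSeat_spec : Claim_equal_minMovesToSeat := by
  intro seats students _ hpre
  show _ = _
  unfold minMovesToSeat minMovesToSeat_alt
  rw [foldA _ _ (by simpa [PySem.List.length_sorted] using hpre)]
  rw [altLoop_eq students.length seats students 0 rfl hpre]
  simp
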